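-- pv_equiv track=rewrite | github.com/DDokddoks/2023-Algorithm-Study | Week5/Pick A Tangerine/hyewon.py | solution
-- ===== SOURCE A (Python) =====
-- from collections import Counter
--
-- def solution(k, tangerine):
--     counts = 0
--     answer = 0
--     for t in Counter(tangerine).most_common():
--         answer += 1
--         counts += t[1]
--         if counts >= k: break
--     return answer
-- ===== SOURCE B (Python) =====
-- def solution(k, tangerine):
--     # Counting sort over frequency values instead of comparison-sorting the counts.
--     freq = {}
--     for t in tangerine:
--         freq[t] = freq.get(t, 0) + 1
--     maxf = 0
--     for c in freq.values():
--         if maxf < c: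
--             maxf = c
--     bucket = {}
--     for c in freq.values():
--         bucket[c] = bucket.get(c, 0) + 1
--     counts = 0
--     answer = 0
--     for f in range(maxf, 0, -1):
--         for _ in range(bucket.get(f, 0)):
--             answer += 1
--             counts += f
--             if counts >= k:
--                 return answer
--     return answer
-- ===== Notes on version B (the rewrite author's own statement) =====
-- stated objective: alternative
-- what changed: Replaces Counter.most_common()'s comparison sort of the frequency list by a counting sort: bucket-count the frequency values and walk the buckets from the maximum frequency downward while accumulating; asymptotically O(n) vs O(n log n), but not measurably faster in CPython, where the built-in sort runs in C.
import Mathlib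
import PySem

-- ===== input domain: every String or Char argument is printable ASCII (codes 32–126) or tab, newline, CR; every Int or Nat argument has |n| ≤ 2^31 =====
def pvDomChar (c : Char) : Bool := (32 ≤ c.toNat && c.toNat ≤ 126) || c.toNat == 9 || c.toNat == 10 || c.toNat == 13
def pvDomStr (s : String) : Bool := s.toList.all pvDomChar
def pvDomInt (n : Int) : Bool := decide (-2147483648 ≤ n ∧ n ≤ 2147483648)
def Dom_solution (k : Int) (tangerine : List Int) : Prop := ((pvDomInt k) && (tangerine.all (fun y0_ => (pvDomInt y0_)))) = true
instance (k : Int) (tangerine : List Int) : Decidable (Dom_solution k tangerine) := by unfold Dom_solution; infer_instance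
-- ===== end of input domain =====

-- B replaces the sort of the frequency list by a counting sort over the frequency
-- values (bucket counts iterated from the maximum downward); same return value.

-- ===== PORT A =====
-- the 'for t in …: answer += 1; counts += t[1]; if counts >= k: break' loop
def solLoopA (k : Int) : List (Int × Int) → Int → Int → Int
  | [], _counts, answer => answer
  | t :: ts, counts, answer =>
      let answer' := answer + 1
      let counts' := counts + t.2
      if k ≤ counts' then answer' else solLoopA k ts counts' answer'

def solution (k : Int) (tangerine : List Int) : Int :=
  -- Counter(tangerine).most_common() = sorted(counter.items(), key=itemgetter(1), reverse=True)
  solLoopA k (PySem.List.sorted (PySem.Dict.counter tangerine).items (fun t => t.2) true) 0 0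

-- ===== PORT B =====
-- inner 'for _ in range(bucket.get(f, 0))' loop; .inl = early 'return answer'
def solAltInner (k f : Int) : Nat → Int → Int → Sum Int (Int × Int)
  | 0, counts, answer => .inr (counts, answer)
  | n + 1, counts, answer =>
      let answer' := answer + 1
      let counts' := counts + f
      if k ≤ counts' then .inl answer' else solAltInner k f n counts' answer'

-- outer 'for f in range(maxf, 0, -1)' loop (f counts down maxf, maxf-1, …, 1)
def solAltOuter (k : Int) (bucket : PySem.Dict Int Int) : Nat → Int → Int → Int
  | 0, _counts, answer => answer
  | f + 1, counts, answer =>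
      match solAltInner k (f + 1 : Nat) ((bucket.getD (f + 1 : Nat) 0).toNat) counts answer with
      | .inl ans => ans
      | .inr (counts', answer') => solAltOuter k bucket f counts' answer'

def solution_alt (k : Int) (tangerine : List Int) : Int :=
  let freq := tangerine.foldl (fun d x => d.insert x (d.getD x 0 + 1)) PySem.Dict.empty
  let maxf := freq.values.foldl (fun m c => if m < c then c else m) 0
  let bucket := freq.values.foldl (fun d c => d.insert c (d.getD c 0 + 1)) PySem.Dict.empty
  -- maxf ≥ 0 always (it starts at 0), so range(maxf, 0, -1) is f = maxf, …, 1: counted down by solAltOuter on maxf.toNat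
  solAltOuter k bucket maxf.toNat 0 0

-- ===== PRECONDITION & SPEC =====
def Spec_solution (k : Int) (tangerine : List Int) (out : Int) : Prop := out = solution_alt k tangerine
instance (k : Int) (tangerine : List Int) (out : Int) : Decidable (Spec_solution k tangerine out) := by unfold Spec_solution; infer_instance

-- ===== CLAIM (what is proved, stated in full; the proofs are below) =====
def Claim_equal_solution : Prop := ∀ (k : Int) (tangerine : List Int), Dom_solution k tangerine → Spec_solution k tangerine (solution k tangerine)

-- ===== LEMMAS AND PROOFS =====

-- the common value-only loop both ports reduce to
def solLoopV (k : Int) : List Int → Int → Int → Int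
  | [], _counts, answer => answer
  | v :: vs, counts, answer =>
      if k ≤ counts + v then answer + 1 else solLoopV k vs (counts + v) (answer + 1)

theorem solLoopA_eq_loopV (k : Int) (l : List (Int × Int)) (c a : Int) :
    solLoopA k l c a = solLoopV k (l.map (·.2)) c a := by
  induction l generalizing c a with
  | nil => rfl
  | cons t ts ih =>
      simp only [solLoopA, solLoopV, List.map]
      split_ifs <;> simp [ih]

theorem solAltInner_spec (k f : Int) (n : Nat) (c a : Int) (rest : List Int) :
    (match solAltInner k f n c a with
      | .inl ans => ans
      | .inr (c', a') => solLoopV k rest c' a') =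
    solLoopV k (List.replicate n f ++ rest) c a := by
  induction n generalizing c a with
  | zero => rfl
  | succ m ih =>
      simp only [solAltInner, List.replicate, List.cons_append, solLoopV]
      split_ifs <;> simp [ih]

-- the list of values the outer loop of B visits: bucket[f] copies of f, for f = n, …, 1
def descList (bucket : PySem.Dict Int Int) : Nat → List Int
  | 0 => []
  | f + 1 => List.replicate ((bucket.getD (f + 1 : Nat) 0).toNat) ((f + 1 : Nat) : Int) ++ descList bucket f

theorem solAltOuter_eq_loopV (k : Int) (bucket : PySem.Dict Int Int) (n : Nat) (c a : Int) :
    solAltOuter k bucket n c a = solLoopV k (descList bucket n) c a := by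
  induction n generalizing c a with
  | zero => rfl
  | succ f ih =>
      simp only [solAltOuter, descList]
      rw [← solAltInner_spec]
      cases h : solAltInner k ((f + 1 : Nat) : Int) ((bucket.getD ((f + 1 : Nat) : Int) 0).toNat) c a with
      | inl ans => simp
      | inr p => simp [ih]

theorem count_descList (V : List Int) (n : Nat) (x : Int) :
    (descList (PySem.Dict.counter V) n).count x =
      if 1 ≤ x ∧ x ≤ (n : Int) then V.count x else 0 := by
  induction n with
  | zero =>
      simp only [descList, List.count_nil, Nat.cast_zero]
      rw [if_neg (by omega)]
  | succ m ih =>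
      simp only [descList, List.count_append, List.count_replicate, ih,
        PySem.Dict.getD_counter, Int.toNat_natCast, beq_iff_eq]
      by_cases hx : ((m + 1 : Nat) : Int) = x
      · subst hx
        rw [if_pos rfl, if_neg (by push_cast; omega), if_pos (by push_cast; omega)]; omega
      · rw [if_neg hx]
        by_cases h1 : 1 ≤ x ∧ x ≤ (m : Int)
        · rw [if_pos h1, if_pos (by push_cast at *; omega)]; omega
        · rw [if_neg h1, if_neg (by push_cast at *; omega)]

theorem descList_bounded_pairwise (bucket : PySem.Dict Int Int) (n : Nat) :
    (∀ x ∈ descList bucket n, x ≤ (n : Int)) ∧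
    (descList bucket n).Pairwise (fun a b => b ≤ a) := by
  induction n with
  | zero => simp [descList]
  | succ m ih =>
      constructor
      · intro x hx
        rcases List.mem_append.mp hx with h | h
        · rw [List.eq_of_mem_replicate h]
        · have := ih.1 x h; push_cast at *; omega
      · rw [descList, List.pairwise_append]
        refine ⟨?_, ih.2, ?_⟩
        · rw [List.pairwise_replicate]; right; exact le_refl _
        · intro a ha b hb
          rw [List.eq_of_mem_replicate ha]
          have := ih.1 b hb; push_cast at *; omega

theorem counter_values_pos (xs : List Int) : ∀ v ∈ (PySem.Dict.counter xs).values, 1 ≤ v := by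
  intro v hv
  have hval : (PySem.Dict.counter xs).values
      = (PySem.Set.ofList xs).map (fun k => (xs.count k : Int)) := by
    show (PySem.Dict.counter xs).items.map (·.2) = _
    rw [PySem.Dict.items_counter, List.map_map]; rfl
  rw [hval] at hv
  obtain ⟨kk, hk, rfl⟩ := List.mem_map.mp hv
  have hmem : kk ∈ xs := (PySem.Set.mem_ofList xs kk).mp hk
  exact_mod_cast List.count_pos_iff.mpr hmem

theorem solution_values_eq (k : Int) (tan : List Int) :
    solution k tan = solution_alt k tan := by
  unfold solution solution_alt
  simp only [PySem.Dict.foldl_insert_getD_add_one_eq_counter]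
  set V : List Int := (PySem.Dict.counter tan).values with hVdef
  have hmaxf : V.foldl (fun m c => if m < c then c else m) 0 = V.foldl max 0 := by
    apply PySem.List.foldl_congr_mem
    intro acc x _
    by_cases h : acc < x <;> simp [h, max_def] <;> omega
  rw [hmaxf]
  set maxf : Int := V.foldl max 0 with hmdef
  have hm0 : 0 ≤ maxf := (PySem.List.le_foldl_max V 0).1
  have hmub : ∀ v ∈ V, v ≤ maxf := (PySem.List.le_foldl_max V 0).2
  have hpos : ∀ v ∈ V, 1 ≤ v := counter_values_pos tan
  -- the two value sequences
  set LA : List Int :=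
    (PySem.List.sorted (PySem.Dict.counter tan).items (fun t => t.2) true).map (·.2) with hLA
  set LB : List Int := descList (PySem.Dict.counter V) maxf.toNat with hLB
  have hpermA : LA.Perm V := by
    have := (PySem.List.sorted_perm (PySem.Dict.counter tan).items (fun t => t.2) true).map (·.2)
    exact this
  have hpermB : LB.Perm V := by
    rw [List.perm_iff_count]
    intro a
    rw [hLB, count_descList]
    rw [Int.toNat_of_nonneg hm0]
    by_cases h : 1 ≤ a ∧ a ≤ maxf
    · rw [if_pos h]
    · rw [if_neg h]
      symm
      rw [List.count_eq_zero]
      intro hmem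
      exact h ⟨hpos a hmem, hmub a hmem⟩
  have hpwA : LA.Pairwise (fun a b => b ≤ a) := by
    rw [hLA, List.pairwise_map]
    exact PySem.List.sorted_pairwise_rev (PySem.Dict.counter tan).items (fun t => t.2)
  have hpwB : LB.Pairwise (fun a b => b ≤ a) :=
    (descList_bounded_pairwise (PySem.Dict.counter V) maxf.toNat).2
  have hLAB : LA = LB := by
    apply PySem.List.eq_of_perm_of_pairwise_le_of_injective (fun x : Int => -x) neg_injective
      (hpermA.trans hpermB.symm)
    · exact hpwA.imp (fun h => neg_le_neg h)
    · exact hpwB.imp (fun h => neg_le_neg h)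
  rw [solLoopA_eq_loopV, solAltOuter_eq_loopV, ← hLA, ← hLB, hLAB]

-- ===== VERDICT (by name: the statement is the Claim_ definition above) =====
theorem solution_spec : Claim_equal_solution := by
  intro k tan _
  exact solution_values_eq k tan
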